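-- pv_equiv track=rewrite | github.com/yuvalTrip/research_Algo | demot_FaSt_implemantation_reginput/FaSt.py | get_unsorted_leximin_tuple
-- ===== SOURCE A (Python) =====
-- def get_unsorted_leximin_tuple(matching, V):
--     """
--     Generate the leximin tuple based on the given matching and evaluations,
--     including the sum of valuations for each college.
--
--     :param matching: The current matching dictionary
--     :param V: The evaluations matrix
--     :return: UNSORTED Leximin tuple
--     """
--     leximin_tuple = []
--     college_sums = []
--
--     # Iterate over each college in the matching
--     for college, students in matching.items():
--         college_sum = 0
--         # For each student in the college, append their valuation for the college to the leximin tuple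
--         for student in students:
--             valuation = V[student - 1][college - 1]
--             leximin_tuple.append(valuation)
--             college_sum += valuation
--         college_sums.append(college_sum)
--     # Append the college sums to the leximin tuple
--     leximin_tuple.extend(college_sums)
--     return leximin_tuple
-- ===== SOURCE B (Python) =====
-- def get_unsorted_leximin_tuple(matching, V):
--     # Recursive decomposition over the list of (college, students) items:
--     # materialize each college's valuation group ONCE, combine (flat, sums)
--     # pairs structurally, and sum each stored group instead of re-reading V
--     # or maintaining running accumulators across the iteration.
--     def go(items):
--         if not items:
--             return [], []
--         (college, students), rest = items[0], items[1:]
--         group = [V[s - 1][college - 1] for s in students]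
--         flat, sums = go(rest)
--         return group + flat, [sum(group)] + sums
--     flat, sums = go(list(matching.items()))
--     return flat + sums
-- ===== Notes on version B (the rewrite author's own statement) =====
-- stated objective: alternative
-- what changed: Replaced A's single iterative loop with running accumulators by a structural recursion over the matching items that materializes each college's valuation group once and combines (flat, sums) pairs, summing the stored groups rather than accumulating while reading V.
import Mathlib
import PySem

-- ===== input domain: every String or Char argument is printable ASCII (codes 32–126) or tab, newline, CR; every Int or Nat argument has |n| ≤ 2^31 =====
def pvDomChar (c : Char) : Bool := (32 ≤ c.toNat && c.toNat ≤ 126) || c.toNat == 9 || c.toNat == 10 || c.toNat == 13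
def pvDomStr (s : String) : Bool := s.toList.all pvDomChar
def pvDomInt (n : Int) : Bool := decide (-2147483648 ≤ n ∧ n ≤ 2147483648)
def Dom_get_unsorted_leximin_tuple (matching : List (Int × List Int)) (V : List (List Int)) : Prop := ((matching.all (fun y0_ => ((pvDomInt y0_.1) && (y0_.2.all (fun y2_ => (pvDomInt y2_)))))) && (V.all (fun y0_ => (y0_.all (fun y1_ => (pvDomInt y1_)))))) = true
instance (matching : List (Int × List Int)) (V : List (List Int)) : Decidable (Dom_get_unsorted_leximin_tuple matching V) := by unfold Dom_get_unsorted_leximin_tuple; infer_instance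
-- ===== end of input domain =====

-- B replaces A's single iterative loop with running accumulators by a structural recursion over the
-- matching items that materializes each college's valuation group and sums the stored group; objective: alternative.
-- Both Pythons raise IndexError for out-of-range student/college indices; Pre_ excludes exactly those inputs.

-- ===== PORT A =====
-- V[student-1][college-1]; out-of-range (IndexError, outside Pre_) ported as default 0
def pvVal (V : List (List Int)) (college student : Int) : Int :=
  (PySem.List.pyGet? ((PySem.List.pyGet? V (student - 1)).getD []) (college - 1)).getD 0

def get_unsorted_leximin_tuple (matching : List (Int × List Int)) (V : List (List Int)) : List Int :=
  let st := matching.foldl (fun (acc : List Int × List Int) p =>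
      let inner := p.2.foldl (fun (q : List Int × Int) s =>
          let v := pvVal V p.1 s
          (q.1 ++ [v], q.2 + v)) (acc.1, 0)
      (inner.1, acc.2 ++ [inner.2])) ([], [])
  st.1 ++ st.2

-- ===== PORT B =====
-- recursive helper 'go' of Source B: combines (flat, sums) pairs structurally
def pvGo (V : List (List Int)) : List (Int × List Int) → List Int × List Int
  | [] => ([], [])
  | p :: rest =>
    let group := p.2.map (fun s => pvVal V p.1 s)
    let r := pvGo V rest
    (group ++ r.1, (group.foldl (· + ·) 0) :: r.2)

def get_unsorted_leximin_tuple_alt (matching : List (Int × List Int)) (V : List (List Int)) : List Int :=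
  let r := pvGo V matching
  r.1 ++ r.2

-- ===== PRECONDITION & SPEC =====
-- exactly the inputs on which Python A returns (every V[s-1][c-1] lookup in range, Python index semantics)
def Pre_get_unsorted_leximin_tuple (matching : List (Int × List Int)) (V : List (List Int)) : Prop :=
  ∀ p ∈ matching, ∀ s ∈ p.2,
    ((PySem.List.pyGet? V (s - 1)).bind (fun row => PySem.List.pyGet? row (p.1 - 1))).isSome
instance (matching : List (Int × List Int)) (V : List (List Int)) : Decidable (Pre_get_unsorted_leximin_tuple matching V) := by unfold Pre_get_unsorted_leximin_tuple; infer_instance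
def pvWitness_get_unsorted_leximin_tuple : (List (Int × List Int)) × List (List Int) := ([(1, [1, 2]), (2, [2])], [[3, 1], [1, 5]])

def Spec_get_unsorted_leximin_tuple (matching : List (Int × List Int)) (V : List (List Int)) (out : List Int) : Prop := out = get_unsorted_leximin_tuple_alt matching V
instance (matching : List (Int × List Int)) (V : List (List Int)) (out : List Int) : Decidable (Spec_get_unsorted_leximin_tuple matching V out) := by unfold Spec_get_unsorted_leximin_tuple; infer_instance

-- ===== CLAIM =====
def Claim_equal_get_unsorted_leximin_tuple : Prop := ∀ (matching : List (Int × List Int)) (V : List (List Int)), Dom_get_unsorted_leximin_tuple matching V → Pre_get_unsorted_leximin_tuple matching V → Spec_get_unsorted_leximin_tuple matching V (get_unsorted_leximin_tuple matching V)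

-- ===== LEMMAS AND PROOFS =====
theorem pv_inner (V : List (List Int)) (c : Int) (studs : List Int) (L : List Int) (c0 : Int) :
    studs.foldl (fun (q : List Int × Int) s => (q.1 ++ [pvVal V c s], q.2 + pvVal V c s)) (L, c0)
      = (L ++ studs.map (fun s => pvVal V c s), (studs.map (fun s => pvVal V c s)).foldl (· + ·) c0) := by
  induction studs generalizing L c0 with
  | nil => simp
  | cons s t ih => simp [List.foldl, ih]

theorem pv_go_spec (V : List (List Int)) (m : List (Int × List Int)) :
    pvGo V m = (m.flatMap (fun p => p.2.map (fun s => pvVal V p.1 s)),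
                m.map (fun p => (p.2.map (fun s => pvVal V p.1 s)).foldl (· + ·) 0)) := by
  induction m with
  | nil => simp [pvGo]
  | cons p t ih => simp [pvGo, ih]

theorem pv_outer (V : List (List Int)) (m : List (Int × List Int)) (L1 L2 : List Int) :
    m.foldl (fun (acc : List Int × List Int) p =>
        (acc.1 ++ p.2.map (fun s => pvVal V p.1 s),
         acc.2 ++ [(p.2.map (fun s => pvVal V p.1 s)).foldl (· + ·) 0])) (L1, L2)
      = (L1 ++ m.flatMap (fun p => p.2.map (fun s => pvVal V p.1 s)),
         L2 ++ m.map (fun p => (p.2.map (fun s => pvVal V p.1 s)).foldl (· + ·) 0)) := by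
  induction m generalizing L1 L2 with
  | nil => simp
  | cons p t ih =>
    simp only [List.foldl_cons]
    rw [ih]
    simp

-- ===== VERDICT =====
theorem get_unsorted_leximin_tuple_spec : Claim_equal_get_unsorted_leximin_tuple := by
  intro matching V _ _
  unfold Spec_get_unsorted_leximin_tuple get_unsorted_leximin_tuple get_unsorted_leximin_tuple_alt
  simp only [pv_inner, pv_outer, pv_go_spec]
  simp
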